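-- pv_equiv track=rewrite | github.com/dmshirochenko/algorithmic_trainings | yandex_algo_6_0/part_2/G. Цензурное произведение_New.py | censor_counter
-- ===== SOURCE A (Python) =====
-- def censor_counter(s_str, c):
--
--     n = len(s_str)
--     max_len = 0
--     rudeness = 0
--     left = 0
--
--     prefix_a = [0] * (n + 1)
--     prefix_b = [0] * (n + 1)
--
--     for i in range(1, n + 1):
--         prefix_a[i] = prefix_a[i - 1] + (1 if s_str[i - 1] == "a" else 0)
--         prefix_b[i] = prefix_b[i - 1] + (1 if s_str[i - 1] == "b" else 0)
--
--     for right in range(n):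
--         if s_str[right] == "b":
--             rudeness += prefix_a[right + 1] - prefix_a[left]
--
--         while rudeness > c:
--             if s_str[left] == "a":
--                 rudeness -= prefix_b[right + 1] - prefix_b[left]
--             left += 1
--
--         max_len = max(max_len, right - left + 1)
--
--     return max_len
-- ===== SOURCE B (Python) =====
-- def censor_counter(s_str, c):
--     # Different algorithm: three prefix tables (a's, b's, total ab-pairs), a closed-form
--     # pair-count formula for any window, and a per-endpoint binary search for the
--     # smallest admissible left end (valid windows are monotone under shrinking).
--     n = len(s_str)
--     a_cnt = [0] * (n + 1)
--     b_cnt = [0] * (n + 1)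
--     pairs = [0] * (n + 1)
--     for i, ch in enumerate(s_str):
--         a_cnt[i + 1] = a_cnt[i] + (1 if ch == "a" else 0)
--         b_cnt[i + 1] = b_cnt[i] + (1 if ch == "b" else 0)
--         pairs[i + 1] = pairs[i] + (a_cnt[i] if ch == "b" else 0)
--
--     best = 0
--     for r in range(1, n + 1):
--         lo, hi = 0, r
--         while lo < hi:
--             m = (lo + hi) // 2
--             w = pairs[r] - pairs[m] - a_cnt[m] * (b_cnt[r] - b_cnt[m])
--             if w <= c:
--                 hi = m
--             else:
--                 lo = m + 1
--         best = max(best, r - lo)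
--     return best
-- ===== Notes on version B (the rewrite author's own statement) =====
-- stated objective: alternative
-- what changed: Replaced the two-pointer shrink loop by a per-right-endpoint binary search for the smallest valid left end, using a third prefix table of total ab-pair counts and a closed-form formula pairs[r]-pairs[m]-a_cnt[m]*(b_cnt[r]-b_cnt[m]) for any window's pair count (correct because validity is monotone under shrinking a window).
import Mathlib
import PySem

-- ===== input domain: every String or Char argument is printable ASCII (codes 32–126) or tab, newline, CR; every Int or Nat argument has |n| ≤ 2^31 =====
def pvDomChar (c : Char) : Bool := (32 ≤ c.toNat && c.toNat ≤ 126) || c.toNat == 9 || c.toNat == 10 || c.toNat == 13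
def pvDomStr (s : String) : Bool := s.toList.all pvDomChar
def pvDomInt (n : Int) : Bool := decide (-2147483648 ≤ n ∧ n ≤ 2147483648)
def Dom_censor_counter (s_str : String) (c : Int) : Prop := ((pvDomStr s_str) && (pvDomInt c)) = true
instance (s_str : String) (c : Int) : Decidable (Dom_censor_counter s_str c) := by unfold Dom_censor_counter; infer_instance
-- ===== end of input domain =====

-- B replaces A's two-pointer shrink loop by a per-endpoint binary search for the smallest
-- valid left end, using a third prefix table of pair counts and a closed-form window formula.

-- ===== PORT A =====
-- prefix-building loop of A: element i+1 = element i + indicator, built left to right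
def pvBuildPref (ch : Char) : List Char → Int → List Int
  | [], acc => [acc]
  | x :: xs, acc => acc :: pvBuildPref ch xs (acc + (if x == ch then 1 else 0))

-- A's inner `while rudeness > c` loop; fuel only makes it total (inside Pre_ it always exits before fuel runs out)
def pvShrinkA (cs : List Char) (pb : List Int) (c : Int) (r1 : Nat) : Nat → Int → Nat → Int × Nat
  | 0, rud, left => (rud, left)
  | f + 1, rud, left =>
    if rud > c then
      let rud' := if cs.getD left ' ' == 'a' then rud - (pb.getD r1 0 - pb.getD left 0) else rud
      pvShrinkA cs pb c r1 f rud' (left + 1)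
    else (rud, left)

-- A's `for right in range(n)` loop, k = remaining iterations
def pvLoopA (cs : List Char) (pa pb : List Int) (c : Int) : Nat → Nat → Int → Int → Nat → Int
  | 0, _, maxLen, _, _ => maxLen
  | k + 1, right, maxLen, rud, left =>
    let rud1 := if cs.getD right ' ' == 'b' then rud + (pa.getD (right + 1) 0 - pa.getD left 0) else rud
    let p := pvShrinkA cs pb c (right + 1) (cs.length + 1) rud1 left
    pvLoopA cs pa pb c k (right + 1) (max maxLen ((right : Int) - (p.2 : Int) + 1)) p.1 p.2

def censor_counter (s_str : String) (c : Int) : Int :=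
  let cs := s_str.toList
  let pa := pvBuildPref 'a' cs 0
  let pb := pvBuildPref 'b' cs 0
  pvLoopA cs pa pb c cs.length 0 0 0 0

-- ===== PORT B =====
-- B's prefix pass: one left-to-right loop building (a_cnt, b_cnt, pairs) entries
def pvPref : List Char → Int → Int → Int → List (Int × Int × Int)
  | [], a, b, p => [(a, b, p)]
  | ch :: cs, a, b, p =>
    (a, b, p) :: pvPref cs (a + if ch == 'a' then 1 else 0) (b + if ch == 'b' then 1 else 0)
      (p + if ch == 'b' then a else 0)

-- B's `while lo < hi` binary search; fuel only makes it total (hi - lo shrinks every step)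
def pvBSearch (pref : List (Int × Int × Int)) (c : Int) (r : Nat) : Nat → Nat → Nat → Nat
  | 0, lo, _ => lo
  | f + 1, lo, hi =>
    if lo < hi then
      let m := (lo + hi) / 2
      let tm := pref.getD m (0, 0, 0)
      let tr := pref.getD r (0, 0, 0)
      if tr.2.2 - tm.2.2 - tm.1 * (tr.2.1 - tm.2.1) ≤ c then pvBSearch pref c r f lo m
      else pvBSearch pref c r f (m + 1) hi
    else lo

-- B's `for r in range(1, n + 1)` loop, k = remaining iterations
def pvLoopBS (pref : List (Int × Int × Int)) (c : Int) : Nat → Nat → Int → Int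
  | 0, _, best => best
  | k + 1, r, best =>
    let lo := pvBSearch pref c r (r + 1) 0 r
    pvLoopBS pref c k (r + 1) (max best ((r : Int) - (lo : Int)))

def censor_counter_alt (s_str : String) (c : Int) : Int :=
  let cs := s_str.toList
  let pref := pvPref cs 0 0 0
  pvLoopBS pref c cs.length 1 0

-- ===== PRECONDITION & SPEC =====
-- Pre_ excludes c < 0 with a nonempty string: there A's shrink loop walks past the right
-- end of the string and raises IndexError (A never returns a value on those inputs).
def Pre_censor_counter (s_str : String) (c : Int) : Prop := 0 ≤ c ∨ s_str = ""
instance (s_str : String) (c : Int) : Decidable (Pre_censor_counter s_str c) := by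
  unfold Pre_censor_counter; infer_instance
def pvWitness_censor_counter : String × Int := ("abcab", 1)
def Spec_censor_counter (s_str : String) (c : Int) (out : Int) : Prop := out = censor_counter_alt s_str c
instance (s_str : String) (c : Int) (out : Int) : Decidable (Spec_censor_counter s_str c out) := by
  unfold Spec_censor_counter; infer_instance

-- ===== CLAIM (what is proved, stated in full; the proofs are below) =====
def Claim_equal_censor_counter : Prop := ∀ (s_str : String) (c : Int), Dom_censor_counter s_str c → Pre_censor_counter s_str c → Spec_censor_counter s_str c (censor_counter s_str c)

-- ===== LEMMAS AND PROOFS =====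

-- prefix values as functions
def pvPa (cs : List Char) (i : Nat) : Int := (pvBuildPref 'a' cs 0).getD i 0
def pvPb (cs : List Char) (i : Nat) : Int := (pvBuildPref 'b' cs 0).getD i 0
def pvPt (cs : List Char) (i : Nat) : Int := ((pvPref cs 0 0 0).getD i (0, 0, 0)).2.2

-- pair count of the window [l, r)
def pvPc (cs : List Char) (l r : Nat) : Int :=
  ∑ j ∈ Finset.Ico l r, (if cs.getD j ' ' == 'b' then pvPa cs j - pvPa cs l else 0)

theorem pvBuildPref_head (ch : Char) (cs : List Char) (acc : Int) :
    (pvBuildPref ch cs acc).getD 0 0 = acc := by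
  cases cs <;> simp [pvBuildPref]

theorem pvBuildPref_succ (ch : Char) (cs : List Char) (acc : Int) (i : Nat) (h : i < cs.length) :
    (pvBuildPref ch cs acc).getD (i + 1) 0 =
      (pvBuildPref ch cs acc).getD i 0 + (if cs.getD i ' ' == ch then 1 else 0) := by
  induction cs generalizing acc i with
  | nil => simp at h
  | cons x xs ih =>
    cases i with
    | zero =>
      simp only [pvBuildPref, List.getD_cons_succ, List.getD_cons_zero]
      simpa [List.getD] using pvBuildPref_head ch xs (acc + if (x == ch) = true then 1 else 0)
    | succ j =>
      simp only [pvBuildPref, List.getD_cons_succ, List.getD_cons_succ]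
      exact ih _ j (by simpa using h)

theorem pvPa_succ (cs : List Char) (i : Nat) (h : i < cs.length) :
    pvPa cs (i + 1) = pvPa cs i + (if cs.getD i ' ' == 'a' then 1 else 0) :=
  pvBuildPref_succ 'a' cs 0 i h

theorem pvPb_succ (cs : List Char) (i : Nat) (h : i < cs.length) :
    pvPb cs (i + 1) = pvPb cs i + (if cs.getD i ' ' == 'b' then 1 else 0) :=
  pvBuildPref_succ 'b' cs 0 i h

-- first component of B's triple table is A's a-prefix, second is the b-prefix
theorem pvPref_fst (cs : List Char) (a b p : Int) (i : Nat) :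
    ((pvPref cs a b p).getD i (0, 0, 0)).1 = (pvBuildPref 'a' cs a).getD i 0 := by
  induction cs generalizing a b p i with
  | nil => cases i <;> simp [pvPref, pvBuildPref]
  | cons x xs ih =>
    cases i with
    | zero => simp [pvPref, pvBuildPref]
    | succ j =>
      simp only [pvPref, pvBuildPref, List.getD_cons_succ]
      exact ih _ _ _ j

theorem pvPref_snd (cs : List Char) (a b p : Int) (i : Nat) :
    ((pvPref cs a b p).getD i (0, 0, 0)).2.1 = (pvBuildPref 'b' cs b).getD i 0 := by
  induction cs generalizing a b p i with
  | nil => cases i <;> simp [pvPref, pvBuildPref]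
  | cons x xs ih =>
    cases i with
    | zero => simp [pvPref, pvBuildPref]
    | succ j =>
      simp only [pvPref, pvBuildPref, List.getD_cons_succ]
      exact ih _ _ _ j

theorem pvPref_thd_head (cs : List Char) (a b p : Int) :
    ((pvPref cs a b p).getD 0 (0, 0, 0)).2.2 = p := by
  cases cs <;> simp [pvPref]

theorem pvPref_thd_succ (cs : List Char) (a b p : Int) (i : Nat) (h : i < cs.length) :
    ((pvPref cs a b p).getD (i + 1) (0, 0, 0)).2.2 =
      ((pvPref cs a b p).getD i (0, 0, 0)).2.2 +
        (if cs.getD i ' ' == 'b' then ((pvPref cs a b p).getD i (0, 0, 0)).1 else 0) := by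
  induction cs generalizing a b p i with
  | nil => simp at h
  | cons x xs ih =>
    cases i with
    | zero =>
      simp only [pvPref, List.getD_cons_succ, List.getD_cons_zero]
      rw [pvPref_thd_head]
    | succ j =>
      simp only [pvPref, List.getD_cons_succ]
      exact ih _ _ _ j (by simpa using h)

theorem pvPt_succ (cs : List Char) (i : Nat) (h : i < cs.length) :
    pvPt cs (i + 1) = pvPt cs i + (if cs.getD i ' ' == 'b' then pvPa cs i else 0) := by
  unfold pvPt
  rw [pvPref_thd_succ cs 0 0 0 i h, pvPref_fst]
  rfl

theorem pvPc_self (cs : List Char) (l : Nat) : pvPc cs l l = 0 := by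
  simp [pvPc]

theorem pvPc_extend (cs : List Char) (l r : Nat) (hlr : l ≤ r) :
    pvPc cs l (r + 1) = pvPc cs l r + (if cs.getD r ' ' == 'b' then pvPa cs r - pvPa cs l else 0) := by
  simp [pvPc, Finset.sum_Ico_succ_top hlr]

-- #ch in [l, r) equals prefix difference, and in particular the difference is nonnegative
theorem pvPref_count (ch : Char) (cs : List Char) (l r : Nat) (hlr : l ≤ r) (hr : r ≤ cs.length) :
    (pvBuildPref ch cs 0).getD r 0 - (pvBuildPref ch cs 0).getD l 0 =
      ∑ j ∈ Finset.Ico l r, (if cs.getD j ' ' == ch then (1 : Int) else 0) := by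
  induction r, hlr using Nat.le_induction with
  | base => simp
  | succ r hlr ih =>
    rw [Finset.sum_Ico_succ_top hlr, ← ih (by omega), pvBuildPref_succ ch cs 0 r (by omega)]
    ring

theorem pvPb_nonneg (cs : List Char) (l r : Nat) (hlr : l ≤ r) (hr : r ≤ cs.length) :
    0 ≤ pvPb cs r - pvPb cs l := by
  rw [pvPb, pvPb, pvPref_count 'b' cs l r hlr hr]
  exact Finset.sum_nonneg (fun j _ => by split_ifs <;> norm_num)

theorem pvPa_nonneg (cs : List Char) (l r : Nat) (hlr : l ≤ r) (hr : r ≤ cs.length) :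
    0 ≤ pvPa cs r - pvPa cs l := by
  rw [pvPa, pvPa, pvPref_count 'a' cs l r hlr hr]
  exact Finset.sum_nonneg (fun j _ => by split_ifs <;> norm_num)

theorem pvPc_shrink (cs : List Char) (l r : Nat) (hl : l < r) (hr : r ≤ cs.length) :
    pvPc cs (l + 1) r =
      pvPc cs l r - (if cs.getD l ' ' == 'a' then pvPb cs r - pvPb cs l else 0) := by
  have hlen : l < cs.length := by omega
  have hbot : pvPc cs l r =
      ∑ j ∈ Finset.Ico (l + 1) r, (if cs.getD j ' ' == 'b' then pvPa cs j - pvPa cs l else 0) := by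
    rw [pvPc, Finset.sum_eq_sum_Ico_succ_bot hl]
    simp
  have hdiff : pvPc cs l r - pvPc cs (l + 1) r =
      ∑ j ∈ Finset.Ico (l + 1) r,
        (if cs.getD j ' ' == 'b' then pvPa cs (l + 1) - pvPa cs l else 0) := by
    rw [hbot, pvPc, ← Finset.sum_sub_distrib]
    refine Finset.sum_congr rfl (fun j _ => ?_)
    split_ifs <;> ring
  by_cases ha : cs.getD l ' ' = 'a'
  · have ha' : cs[l]?.getD ' ' = 'a' := by simpa [List.getD] using ha
    have hPa : pvPa cs (l + 1) = pvPa cs l + 1 := by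
      rw [pvPa_succ cs l hlen]; simp [List.getD, ha']
    have hPb : pvPb cs (l + 1) = pvPb cs l := by
      rw [pvPb_succ cs l hlen]; simp [List.getD, ha']
    have hsum : pvPc cs l r - pvPc cs (l + 1) r = pvPb cs r - pvPb cs (l + 1) := by
      rw [hdiff, pvPb, pvPb, pvPref_count 'b' cs (l + 1) r (by omega) hr]
      refine Finset.sum_congr rfl (fun j _ => ?_)
      rw [hPa]; split_ifs <;> ring
    rw [hPb] at hsum
    simp only [ha, beq_self_eq_true, if_true]
    omega
  · have ha' : ¬ cs[l]?.getD ' ' = 'a' := by simpa [List.getD] using ha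
    have hPa : pvPa cs (l + 1) = pvPa cs l := by
      rw [pvPa_succ cs l hlen]; simp [List.getD, ha']
    have hsum : pvPc cs l r - pvPc cs (l + 1) r = 0 := by
      rw [hdiff, hPa]; simp
    simp only [beq_iff_eq, ha, if_false]
    omega

-- pair count is antitone in the left end
theorem pvPc_anti (cs : List Char) (r : Nat) (hr : r ≤ cs.length) :
    ∀ l l' : Nat, l ≤ l' → l' ≤ r → pvPc cs l' r ≤ pvPc cs l r := by
  intro l l' hll hlr
  induction l', hll using Nat.le_induction with
  | base => exact le_refl _
  | succ l' hll ih =>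
    have h1 := ih (by omega)
    rw [pvPc_shrink cs l' r (by omega) hr]
    have h2 : 0 ≤ (if cs.getD l' ' ' == 'a' then pvPb cs r - pvPb cs l' else 0) := by
      split_ifs
      · exact pvPb_nonneg cs l' r (by omega) hr
      · exact le_refl 0
    omega

-- pair count is monotone in the right end
theorem pvPc_mono_r (cs : List Char) (l r : Nat) (hlr : l ≤ r) (hr : r < cs.length) :
    pvPc cs l r ≤ pvPc cs l (r + 1) := by
  rw [pvPc_extend cs l r hlr]
  have : 0 ≤ (if cs.getD r ' ' == 'b' then pvPa cs r - pvPa cs l else 0) := by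
    split_ifs
    · exact pvPa_nonneg cs l r hlr (by omega)
    · exact le_refl 0
  omega

-- the closed-form window formula B uses
theorem pvFormula (cs : List Char) (l r : Nat) (hlr : l ≤ r) (hr : r ≤ cs.length) :
    pvPt cs r - pvPt cs l - pvPa cs l * (pvPb cs r - pvPb cs l) = pvPc cs l r := by
  induction r, hlr using Nat.le_induction with
  | base => rw [pvPc_self]; ring
  | succ r hlr ih =>
    have h := ih (by omega)
    rw [pvPc_extend cs l r hlr, pvPt_succ cs r (by omega), pvPb_succ cs r (by omega)]
    by_cases hb : cs.getD r ' ' = 'b'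
    · simp only [hb, beq_self_eq_true, if_true] at *
      nlinarith [h]
    · have hb' : (cs.getD r ' ' == 'b') = false := beq_eq_false_iff_ne.mpr hb
      simp only [hb', Bool.false_eq_true, if_false] at *
      linarith [h]

-- A's shrink loop finds the first valid left end at or after `left`
theorem pvShrinkA_spec (cs : List Char) (c : Int) (hc : 0 ≤ c) (r1 : Nat) (hr1 : r1 ≤ cs.length) :
    ∀ (f : Nat) (rud : Int) (left : Nat), left ≤ r1 → r1 + 1 ≤ f + left →
      rud = pvPc cs left r1 →
      (pvShrinkA cs (pvBuildPref 'b' cs 0) c r1 f rud left).2 ≤ r1 ∧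
      left ≤ (pvShrinkA cs (pvBuildPref 'b' cs 0) c r1 f rud left).2 ∧
      (pvShrinkA cs (pvBuildPref 'b' cs 0) c r1 f rud left).1 =
        pvPc cs (pvShrinkA cs (pvBuildPref 'b' cs 0) c r1 f rud left).2 r1 ∧
      pvPc cs (pvShrinkA cs (pvBuildPref 'b' cs 0) c r1 f rud left).2 r1 ≤ c ∧
      (∀ l, left ≤ l → l < (pvShrinkA cs (pvBuildPref 'b' cs 0) c r1 f rud left).2 →
        c < pvPc cs l r1) := by
  intro f
  induction f with
  | zero => intro rud left h1 h2 _; omega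
  | succ f ih =>
    intro rud left h1 h2 h3
    by_cases hgt : rud > c
    · have hlt : left < r1 := by
        rcases Nat.lt_or_ge left r1 with h | h
        · exact h
        · exfalso
          have : left = r1 := le_antisymm h1 h
          subst this
          rw [pvPc_self] at h3
          omega
      have hrud' :
          (if cs.getD left ' ' == 'a' then
              rud - ((pvBuildPref 'b' cs 0).getD r1 0 - (pvBuildPref 'b' cs 0).getD left 0)
            else rud) = pvPc cs (left + 1) r1 := by
        rw [pvPc_shrink cs left r1 hlt hr1, ← h3]
        by_cases ha : cs.getD left ' ' = 'a'
        · have ha2 : cs[left]?.getD ' ' = 'a' := by simpa [List.getD] using ha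
          simp [ha2, pvPb]
        · have ha2 : ¬ cs[left]?.getD ' ' = 'a' := by simpa [List.getD] using ha
          simp [ha2]
      have hA : pvShrinkA cs (pvBuildPref 'b' cs 0) c r1 (f + 1) rud left =
          pvShrinkA cs (pvBuildPref 'b' cs 0) c r1 f (pvPc cs (left + 1) r1) (left + 1) := by
        simp only [pvShrinkA, hgt, if_true]
        rw [hrud']
      obtain ⟨c1, c2, c3, c4, c5⟩ :=
        ih (pvPc cs (left + 1) r1) (left + 1) (by omega) (by omega) rfl
      rw [hA]
      refine ⟨c1, by omega, c3, c4, ?_⟩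
      intro l hl1 hl2
      rcases Nat.lt_or_ge l (left + 1) with h | h
      · have : l = left := by omega
        subst this
        rw [← h3]; exact hgt
      · exact c5 l h hl2
    · have hA : pvShrinkA cs (pvBuildPref 'b' cs 0) c r1 (f + 1) rud left = (rud, left) := by
        simp [pvShrinkA, hgt]
      rw [hA]
      exact ⟨h1, le_refl _, h3, by rw [← h3]; omega, fun l hl1 hl2 => by omega⟩

-- B's binary search finds the least valid left end
theorem pvBSearch_spec (cs : List Char) (c : Int) (r : Nat) (hr : r ≤ cs.length) :
    ∀ (f lo hi : Nat), hi ≤ r → lo ≤ hi → pvPc cs hi r ≤ c →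
      (∀ l, l < lo → c < pvPc cs l r) → hi - lo < f →
      (pvBSearch (pvPref cs 0 0 0) c r f lo hi) ≤ r ∧
      pvPc cs (pvBSearch (pvPref cs 0 0 0) c r f lo hi) r ≤ c ∧
      (∀ l, l < pvBSearch (pvPref cs 0 0 0) c r f lo hi → c < pvPc cs l r) := by
  intro f
  induction f with
  | zero => intro lo hi _ _ _ _ hf; omega
  | succ f ih =>
    intro lo hi h1 h2 h3 h4 h5
    by_cases hlt : lo < hi
    · have hm1 : lo ≤ (lo + hi) / 2 := by omega
      have hm2 : (lo + hi) / 2 < hi := by omega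
      have hw :
          ((pvPref cs 0 0 0).getD r (0,0,0)).2.2 - ((pvPref cs 0 0 0).getD ((lo + hi) / 2) (0,0,0)).2.2 -
            ((pvPref cs 0 0 0).getD ((lo + hi) / 2) (0,0,0)).1 *
              (((pvPref cs 0 0 0).getD r (0,0,0)).2.1 - ((pvPref cs 0 0 0).getD ((lo + hi) / 2) (0,0,0)).2.1) =
            pvPc cs ((lo + hi) / 2) r := by
        rw [pvPref_fst, pvPref_snd, pvPref_snd]
        exact pvFormula cs ((lo + hi) / 2) r (by omega) hr
      by_cases hcmp : pvPc cs ((lo + hi) / 2) r ≤ c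
      · have hB : pvBSearch (pvPref cs 0 0 0) c r (f + 1) lo hi =
            pvBSearch (pvPref cs 0 0 0) c r f lo ((lo + hi) / 2) := by
          simp only [pvBSearch, hlt, if_true]
          rw [if_pos (by rw [hw]; exact hcmp)]
        rw [hB]
        exact ih lo ((lo + hi) / 2) (by omega) hm1 hcmp h4 (by omega)
      · have hB : pvBSearch (pvPref cs 0 0 0) c r (f + 1) lo hi =
            pvBSearch (pvPref cs 0 0 0) c r f ((lo + hi) / 2 + 1) hi := by
          simp only [pvBSearch, hlt, if_true]
          rw [if_neg (by rw [hw]; exact hcmp)]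
        rw [hB]
        refine ih ((lo + hi) / 2 + 1) hi h1 (by omega) h3 ?_ (by omega)
        intro l hl
        rcases Nat.lt_or_ge l lo with h | h
        · exact h4 l h
        · have hle : pvPc cs ((lo + hi) / 2) r ≤ pvPc cs l r :=
            pvPc_anti cs r hr l ((lo + hi) / 2) (by omega) (by omega)
          omega
    · have : lo = hi := by omega
      subst this
      have hB : pvBSearch (pvPref cs 0 0 0) c r (f + 1) lo lo = lo := by
        simp [pvBSearch]
      rw [hB]
      exact ⟨by omega, h3, h4⟩

-- the two main loops agree step by step: both update the best with r - (least valid left)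
theorem pvLoops_eq (cs : List Char) (c : Int) (hc : 0 ≤ c) :
    ∀ (k right : Nat) (maxLen rud : Int) (left : Nat), right + k = cs.length →
      left ≤ right → rud = pvPc cs left right → (∀ l, l < left → c < pvPc cs l right) →
      pvLoopA cs (pvBuildPref 'a' cs 0) (pvBuildPref 'b' cs 0) c k right maxLen rud left =
        pvLoopBS (pvPref cs 0 0 0) c k (right + 1) maxLen := by
  intro k
  induction k with
  | zero => intro right maxLen rud left _ _ _ _; rfl
  | succ k ih =>
    intro right maxLen rud left hk h1 h3 h4
    have hrlen : right < cs.length := by omega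
    have hr1 : right + 1 ≤ cs.length := by omega
    -- A's rudeness update equals the extended window's pair count
    have hrud1 :
        (if cs.getD right ' ' == 'b' then
            rud + ((pvBuildPref 'a' cs 0).getD (right + 1) 0 - (pvBuildPref 'a' cs 0).getD left 0)
          else rud) = pvPc cs left (right + 1) := by
      rw [pvPc_extend cs left right h1, ← h3]
      by_cases hb : cs.getD right ' ' = 'b'
      · have hb2 : cs[right]?.getD ' ' = 'b' := by simpa [List.getD] using hb
        have hPa1 : pvPa cs (right + 1) = pvPa cs right := by
          rw [pvPa_succ cs right hrlen]
          simp [List.getD, hb2]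
        have h5 : (pvBuildPref 'a' cs 0)[right + 1]?.getD 0 = (pvBuildPref 'a' cs 0)[right]?.getD 0 := hPa1
        simp [hb2, pvPa, List.getD, h5]
      · have hb2 : ¬ cs[right]?.getD ' ' = 'b' := by simpa [List.getD] using hb
        simp [hb2]
    -- lifted invariant: everything left of `left` is invalid for the extended window too
    have h4' : ∀ l, l < left → c < pvPc cs l (right + 1) := by
      intro l hl
      have := pvPc_mono_r cs l right (by omega) hrlen
      have := h4 l hl
      omega
    obtain ⟨a1, a2, a3, a4, a5⟩ :=
      pvShrinkA_spec cs c hc (right + 1) hr1 (cs.length + 1) (pvPc cs left (right + 1)) left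
        (by omega) (by omega) rfl
    obtain ⟨b1, b2, b3⟩ :=
      pvBSearch_spec cs c (right + 1) hr1 (right + 2) 0 (right + 1) (le_refl _) (by omega)
        (by rw [pvPc_self]; exact hc) (fun l hl => by omega) (by omega)
    -- both computed left ends are THE least valid left end, hence equal
    set mA := (pvShrinkA cs (pvBuildPref 'b' cs 0) c (right + 1) (cs.length + 1)
        (pvPc cs left (right + 1)) left).2 with hmA
    set mB := pvBSearch (pvPref cs 0 0 0) c (right + 1) (right + 2) 0 (right + 1) with hmB
    have hAinv : ∀ l, l < mA → c < pvPc cs l (right + 1) := by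
      intro l hl
      rcases Nat.lt_or_ge l left with h | h
      · exact h4' l h
      · exact a5 l h hl
    have heq : mA = mB := by
      rcases Nat.lt_trichotomy mA mB with h | h | h
      · exact absurd a4 (by have := b3 mA h; omega)
      · exact h
      · exact absurd b2 (by have := hAinv mB h; omega)
    -- unfold one iteration of each loop
    show pvLoopA _ _ _ _ (k + 1) _ _ _ _ = pvLoopBS _ _ (k + 1) _ _
    simp only [pvLoopA, pvLoopBS]
    rw [hrud1]
    rw [← hmA, ← hmB, ← heq]
    rw [a3]
    have := ih (right + 1) (max maxLen ((right : Int) - (mA : Int) + 1)) (pvPc cs mA (right + 1))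
      mA (by omega) a1 rfl hAinv
    rw [this]
    congr 1
    all_goals (push_cast; omega)

-- ===== VERDICT (by name: the statement is the Claim_ definition above) =====
theorem censor_counter_spec : Claim_equal_censor_counter := by
  intro s c _ hpre
  unfold Spec_censor_counter censor_counter censor_counter_alt
  rcases hpre with hc | hs
  · show pvLoopA s.toList (pvBuildPref 'a' s.toList 0) (pvBuildPref 'b' s.toList 0) c
        s.toList.length 0 0 0 0 = pvLoopBS (pvPref s.toList 0 0 0) c s.toList.length (0 + 1) 0
    exact (pvLoops_eq s.toList c hc s.toList.length 0 0 0 0 (by omega) (le_refl 0)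
      (by rw [pvPc_self]) (fun l hl => by omega))
  · subst hs; rfl
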